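-- pv_equiv track=rewrite | github.com/abdulah-naeem/Agentic-RAG-Multi-Tenant-Research-Assistant | eval/run_eval.py | build_allowed_doc_ids_by_tenant
-- ===== SOURCE A (Python) =====
-- from typing import Dict, List, Tuple
--
-- def tenant_base(tenant: str) -> str:
--     return tenant.split("_", 1)[0] if "_" in tenant else tenant
--
-- def build_allowed_doc_ids_by_tenant(manifest_rows: List[Dict[str, str]]) -> Dict[str, set]:
--     # Allowed if public (tenant == PUB or doc_id starts with PUB_) or private with same base tenant
--     allowed: Dict[str, set] = {f"U{i}": set() for i in range(1, 10)}
--     public_ids: set = set()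
--     for r in manifest_rows:
--         did = r.get("doc_id", "")
--         ten = r.get("tenant", "")
--         if ten == "PUB" or did.startswith("PUB_"):
--             public_ids.add(did)
--     # Give every Ux all public IDs
--     for k in allowed:
--         allowed[k] |= public_ids
--
--     # Private docs belong to base tenants like U1_genomics -> U1
--     for r in manifest_rows:
--         did = r.get("doc_id", "")
--         ten = r.get("tenant", "")
--         if ten and ten != "PUB":
--             base = tenant_base(ten)
--             if base in allowed:
--                 allowed[base].add(did)
--     return allowed
-- ===== SOURCE B (Python) =====
-- from typing import Dict, List
--
-- def tenant_base(tenant: str) -> str: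
--     return tenant.split("_", 1)[0] if "_" in tenant else tenant
--
-- def build_allowed_doc_ids_by_tenant(manifest_rows: List[Dict[str, str]]) -> Dict[str, set]:
--     # No mutable accumulators: the public doc ids are one comprehension, and each
--     # tenant's set is built independently by filtering the manifest with the
--     # per-tenant allowed predicate (public, or private with matching base).
--     public = [r.get("doc_id", "") for r in manifest_rows
--               if r.get("tenant", "") == "PUB" or r.get("doc_id", "").startswith("PUB_")]
--     return {
--         f"U{i}": set(public
--                      + [r.get("doc_id", "") for r in manifest_rows
--                         if r.get("tenant", "") != "" and r.get("tenant", "") != "PUB"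
--                         and tenant_base(r.get("tenant", "")) == f"U{i}"])
--         for i in range(1, 10)
--     }
-- ===== Notes on version B (the rewrite author's own statement) =====
-- stated objective: alternative
-- what changed: Drops A's mutable dict-of-sets and its three accumulator loops entirely: B computes the public doc-id list with one comprehension and then builds each of the nine tenants' sets independently as set(public + [dids of private rows whose tenant base is that key]) - per-key filtering instead of shared state.
import Mathlib
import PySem

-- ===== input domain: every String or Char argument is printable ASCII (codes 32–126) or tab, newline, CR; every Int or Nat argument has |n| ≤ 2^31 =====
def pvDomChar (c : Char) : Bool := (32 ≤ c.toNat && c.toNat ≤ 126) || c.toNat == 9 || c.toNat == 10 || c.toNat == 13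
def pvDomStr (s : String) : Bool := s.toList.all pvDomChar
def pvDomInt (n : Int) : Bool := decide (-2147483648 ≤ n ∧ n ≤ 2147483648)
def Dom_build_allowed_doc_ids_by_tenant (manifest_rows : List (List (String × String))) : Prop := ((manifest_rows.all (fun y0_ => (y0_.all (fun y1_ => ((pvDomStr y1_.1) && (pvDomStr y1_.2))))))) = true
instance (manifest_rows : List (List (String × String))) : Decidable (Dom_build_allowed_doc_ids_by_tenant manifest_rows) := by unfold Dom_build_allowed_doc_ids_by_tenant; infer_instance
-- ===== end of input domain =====

-- B drops A's mutable dict-of-sets and three accumulator loops: one comprehension collects the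
-- public doc ids and each tenant's set is built independently by filtering the manifest rows.


-- ===== PORT A =====
-- tenant_base: shared module helper (used by both A and B in the Python file).
-- split("_",1) of any string is a nonempty list, so the [0] never raises; the getD/headD
-- defaults are unreachable (splitMax? is none only for sep = "").
def pvTenantBase (tenant : String) : String :=
  if PySem.Str.isIn "_" tenant then
    ((PySem.Str.splitMax? tenant "_" 1).getD []).headD ""
  else tenant

def build_allowed_doc_ids_by_tenant (manifest_rows : List (List (String × String))) : List (String × List String) :=
  let allowed : PySem.Dict String (PySem.Set String) :=
    (PySem.List.pyRange 1 10 1).foldl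
      (fun d i => d.insert ("U" ++ PySem.Int.toStr i) PySem.Set.empty) PySem.Dict.empty
  let public_ids : PySem.Set String :=
    manifest_rows.foldl (fun s r =>
      let did := (PySem.Dict.mk r).getD "doc_id" ""
      let ten := (PySem.Dict.mk r).getD "tenant" ""
      if ten == "PUB" || PySem.Str.startswith did "PUB_" then PySem.Set.add s did else s)
      PySem.Set.empty
  let allowed2 :=
    allowed.keys.foldl
      (fun d k => d.modify k PySem.Set.empty (fun s => PySem.Set.union s public_ids)) allowed
  let allowed3 :=
    manifest_rows.foldl (fun d r =>
      let did := (PySem.Dict.mk r).getD "doc_id" ""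
      let ten := (PySem.Dict.mk r).getD "tenant" ""
      if ten != "" && ten != "PUB" then
        let base := pvTenantBase ten
        if d.contains base then d.modify base PySem.Set.empty (fun s => PySem.Set.add s did)
        else d
      else d) allowed2
  allowed3.items

-- ===== PORT B =====
def build_allowed_doc_ids_by_tenant_alt (manifest_rows : List (List (String × String))) : List (String × List String) :=
  let pubList : List String :=
    (manifest_rows.filter (fun r =>
        (PySem.Dict.mk r).getD "tenant" "" == "PUB" ||
        PySem.Str.startswith ((PySem.Dict.mk r).getD "doc_id" "") "PUB_")).map
      (fun r => (PySem.Dict.mk r).getD "doc_id" "")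
  (PySem.List.pyRange 1 10 1).map (fun i =>
    let k := "U" ++ PySem.Int.toStr i
    (k, PySem.Set.ofList (pubList ++
      (manifest_rows.filter (fun r =>
          (PySem.Dict.mk r).getD "tenant" "" != "" &&
          (PySem.Dict.mk r).getD "tenant" "" != "PUB" &&
          pvTenantBase ((PySem.Dict.mk r).getD "tenant" "") == k)).map
        (fun r => (PySem.Dict.mk r).getD "doc_id" ""))))

-- ===== PRECONDITION & SPEC =====
def Spec_build_allowed_doc_ids_by_tenant (manifest_rows : List (List (String × String))) (out : List (String × List String)) : Prop := out = build_allowed_doc_ids_by_tenant_alt manifest_rows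
instance (manifest_rows : List (List (String × String))) (out : List (String × List String)) : Decidable (Spec_build_allowed_doc_ids_by_tenant manifest_rows out) := by unfold Spec_build_allowed_doc_ids_by_tenant; infer_instance

-- ===== CLAIM (what is proved, stated in full; the proofs are below) =====
def Claim_equal_build_allowed_doc_ids_by_tenant : Prop := ∀ (manifest_rows : List (List (String × String))), Dom_build_allowed_doc_ids_by_tenant manifest_rows → Spec_build_allowed_doc_ids_by_tenant manifest_rows (build_allowed_doc_ids_by_tenant manifest_rows)


-- ===== LEMMAS AND PROOFS =====

-- proof-side abbreviations for the row fields, predicates and loop steps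
def pvDid (r : List (String × String)) : String := (PySem.Dict.mk r).getD "doc_id" ""
def pvTen (r : List (String × String)) : String := (PySem.Dict.mk r).getD "tenant" ""
def pvPub (r : List (String × String)) : Bool := pvTen r == "PUB" || PySem.Str.startswith (pvDid r) "PUB_"
def pvPriv (r : List (String × String)) : Bool := pvTen r != "" && pvTen r != "PUB"
def pvBase (r : List (String × String)) : String := pvTenantBase (pvTen r)
def pvStepPub (s : PySem.Set String) (r : List (String × String)) : PySem.Set String :=
  if pvPub r then PySem.Set.add s (pvDid r) else s
def pvStepA3 (d : PySem.Dict String (PySem.Set String)) (r : List (String × String)) :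
    PySem.Dict String (PySem.Set String) :=
  if pvPriv r then
    (if d.contains (pvBase r) then d.modify (pvBase r) PySem.Set.empty (fun s => PySem.Set.add s (pvDid r)) else d)
  else d
def pvPubFold (rows : List (List (String × String))) : PySem.Set String :=
  rows.foldl pvStepPub PySem.Set.empty
def pvD0 : PySem.Dict String (PySem.Set String) :=
  PySem.Dict.mk [("U1",[]),("U2",[]),("U3",[]),("U4",[]),("U5",[]),("U6",[]),("U7",[]),("U8",[]),("U9",[])]
def pvD2 (rows : List (List (String × String))) : PySem.Dict String (PySem.Set String) :=
  pvD0.keys.foldl (fun d k => d.modify k PySem.Set.empty (fun s => PySem.Set.union s (pvPubFold rows))) pvD0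

def pvKeys9 : List String := ["U1","U2","U3","U4","U5","U6","U7","U8","U9"]

-- A's three stages, in pv-notation (definitional repackaging of the port)
theorem pv_A_eq (rows : List (List (String × String))) :
    build_allowed_doc_ids_by_tenant rows = (rows.foldl pvStepA3 (pvD2 rows)).items := rfl

-- B in pv-notation (definitional repackaging of the port)
theorem pv_B_eq (rows : List (List (String × String))) :
    build_allowed_doc_ids_by_tenant_alt rows
      = (PySem.List.pyRange 1 10 1).map (fun i =>
          let k := "U" ++ PySem.Int.toStr i
          (k, PySem.Set.ofList (((rows.filter pvPub).map pvDid) ++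
            ((rows.filter (fun r => pvPriv r && (pvBase r == k))).map pvDid)))) := rfl

-- a fold of guarded modifies over a Nodup-keyed dict acts per item
theorem pv_master {β : Type} (cond : β → Bool) (g : β → String)
    (f : β → PySem.Set String → PySem.Set String) :
    ∀ (l : List β) (d : PySem.Dict String (PySem.Set String)), d.keys.Nodup →
      (l.foldl (fun d b =>
          if cond b then
            (if d.contains (g b) then d.modify (g b) PySem.Set.empty (f b) else d)
          else d) d).items
        = d.items.map (fun p => (p.1,
            (l.filter (fun b => cond b && (g b == p.1))).foldl (fun s b => f b s) p.2)) := by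
  intro l
  induction l with
  | nil =>
    intro d _
    simp
  | cons b l ih =>
    intro d hnd
    simp only [List.foldl_cons]
    by_cases hc : cond b
    · by_cases hct : d.contains (g b)
      · -- modify the (unique) item with key g b, then recurse
        simp only [hc, if_true, hct]
        have hmod : (d.modify (g b) PySem.Set.empty (f b)).items
            = d.items.map (fun p => if (p.1 == g b) then (g b, f b (d.getD (g b) PySem.Set.empty)) else p) :=
          PySem.Dict.items_insert_of_contains d _ hct
        have hkeys : (d.modify (g b) PySem.Set.empty (f b)).keys = d.keys := by
          rw [PySem.Dict.keys_modify, PySem.Dict.keys_insert_of_contains _ _ hct]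
        rw [ih _ (by rw [hkeys]; exact hnd), hmod, List.map_map]
        apply List.map_congr_left
        intro p hp
        by_cases hpe : p.1 = g b
        · have hget : d.getD p.1 PySem.Set.empty = p.2 :=
            PySem.Dict.getD_of_mem_items d (by simpa using hp) hnd _
          simp only [Function.comp, hpe, beq_self_eq_true, if_true, List.filter_cons, hc,
            Bool.true_and, List.foldl_cons]
          rw [← hpe, hget]
        · simp only [Function.comp, beq_iff_eq, hpe, if_false, List.filter_cons, hc, Bool.true_and]
          have : ¬ (g b = p.1) := fun h => hpe h.symm
          simp [this]
      · -- key absent: the dict is untouched and no item matches g b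
        simp only [hc, if_true, hct, Bool.false_eq_true, if_false]
        rw [ih _ hnd]
        apply List.map_congr_left
        intro p hp
        have hmem : p.1 ∈ d.keys := by
          have : p.1 ∈ d.items.map (fun q => q.1) := List.mem_map_of_mem hp
          simpa [PySem.Dict.keys] using this
        have hne : ¬ (g b = p.1) := by
          intro h
          exact hct ((PySem.Dict.contains_iff_mem_keys d (g b)).mpr (h ▸ hmem))
        simp [hc, hne]
    · have hcf : cond b = false := Bool.eq_false_iff.mpr hc
      simp only [hcf, Bool.false_eq_true, if_false]
      rw [ih _ hnd]
      apply List.map_congr_left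
      intro p _
      simp [hcf]

-- the second A-loop: unconditional modify over a Nodup key list covering the dict
theorem pv_all (F : PySem.Set String → PySem.Set String) :
    ∀ (ks : List String) (d : PySem.Dict String (PySem.Set String)), d.keys.Nodup → ks.Nodup →
      (∀ k ∈ ks, d.contains k) →
      (ks.foldl (fun d k => d.modify k PySem.Set.empty F) d).items
        = d.items.map (fun p => if p.1 ∈ ks then (p.1, F p.2) else p) := by
  intro ks
  induction ks with
  | nil =>
    intro d _ _ _
    simp
  | cons k ks ih =>
    intro d hnd hks hcov
    have hct : d.contains k := hcov k (List.mem_cons_self)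
    simp only [List.foldl_cons]
    have hmod : (d.modify k PySem.Set.empty F).items
        = d.items.map (fun p => if (p.1 == k) then (k, F (d.getD k PySem.Set.empty)) else p) :=
      PySem.Dict.items_insert_of_contains d _ hct
    have hkeys : (d.modify k PySem.Set.empty F).keys = d.keys := by
      rw [PySem.Dict.keys_modify, PySem.Dict.keys_insert_of_contains _ _ hct]
    have hcov' : ∀ k' ∈ ks, (d.modify k PySem.Set.empty F).contains k' := by
      intro k' hk'
      rw [PySem.Dict.contains_iff_mem_keys, hkeys, ← PySem.Dict.contains_iff_mem_keys]
      exact hcov k' (List.mem_cons_of_mem _ hk')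
    rw [ih _ (by rw [hkeys]; exact hnd) (List.Nodup.of_cons hks) hcov', hmod, List.map_map]
    apply List.map_congr_left
    intro p hp
    by_cases hpe : p.1 = k
    · have hknk : k ∉ ks := (List.nodup_cons.mp hks).1
      have hget : d.getD p.1 PySem.Set.empty = p.2 :=
        PySem.Dict.getD_of_mem_items d (by simpa using hp) hnd _
      simp only [Function.comp, hpe, beq_self_eq_true, if_true, hknk, if_false, List.mem_cons]
      rw [← hpe, hget]
      simp
    · simp only [Function.comp, beq_iff_eq, hpe, if_false, List.mem_cons]
      simp

-- the per-key identity: A's "seed with the public set, then add each private doc" equals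
-- B's "dedup of the public list followed by the private list"
theorem pv_key (rows : List (List (String × String))) (k : String) :
    (rows.filter (fun r => pvPriv r && (pvBase r == k))).foldl
        (fun s r => PySem.Set.add s (pvDid r)) (PySem.Set.union PySem.Set.empty (pvPubFold rows))
      = PySem.Set.ofList (((rows.filter pvPub).map pvDid) ++
          ((rows.filter (fun r => pvPriv r && (pvBase r == k))).map pvDid)) := by
  have hP : pvPubFold rows = PySem.Set.ofList ((rows.filter pvPub).map pvDid) := by
    have : pvPubFold rows = (rows.filter pvPub).foldl (fun s r => PySem.Set.add s (pvDid r)) PySem.Set.empty := by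
      rw [List.foldl_filter]
      rfl
    rw [this, ← PySem.Set.update_map_eq_foldl_add,
        show (PySem.Set.empty : PySem.Set String) = [] from rfl, PySem.Set.update_nil_left]
  have hPn : (pvPubFold rows).Nodup := by rw [hP]; exact PySem.Set.nodup_ofList _
  have hUnionEmpty : PySem.Set.union PySem.Set.empty (pvPubFold rows) = pvPubFold rows := by
    show PySem.Set.update [] (pvPubFold rows) = pvPubFold rows
    rw [PySem.Set.update_nil_left, PySem.Set.ofList_eq_self_of_nodup _ hPn]
  rw [hUnionEmpty, hP, ← PySem.Set.update_map_eq_foldl_add, ← PySem.Set.ofList_append]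

-- ===== VERDICT (by name: the statement is the Claim_ definition above) =====
set_option maxHeartbeats 1000000 in
theorem build_allowed_doc_ids_by_tenant_spec : Claim_equal_build_allowed_doc_ids_by_tenant := by
  intro rows _
  show build_allowed_doc_ids_by_tenant rows = build_allowed_doc_ids_by_tenant_alt rows
  rw [pv_A_eq, pv_B_eq]
  -- A's second stage, computed on the literal nine-key dict
  have hd2 : (pvD2 rows).items
      = pvD0.items.map (fun p => (p.1, PySem.Set.union p.2 (pvPubFold rows))) := by
    rw [pvD2, pv_all (fun s => PySem.Set.union s (pvPubFold rows)) pvD0.keys pvD0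
          (by decide) (by decide) (by intro k hk; rw [PySem.Dict.contains_iff_mem_keys]; exact hk)]
    apply List.map_congr_left
    intro p hp
    have : p.1 ∈ pvD0.keys := by
      have : p.1 ∈ pvD0.items.map (fun q => q.1) := List.mem_map_of_mem hp
      simpa [PySem.Dict.keys] using this
    simp [this]
  have hkeysdef : ∀ (d : PySem.Dict String (PySem.Set String)), d.keys = d.items.map (fun p => p.1) :=
    fun _ => rfl
  have hd2keys : (pvD2 rows).keys.Nodup := by
    rw [hkeysdef, hd2, List.map_map]
    have : (pvD0.items.map ((fun p => p.1) ∘ (fun p => (p.1, PySem.Set.union p.2 (pvPubFold rows)))))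
        = pvD0.items.map (fun p => p.1) := by
      apply List.map_congr_left; intro p _; rfl
    rw [this]
    decide
  rw [show pvStepA3 = (fun d b =>
        if pvPriv b then
          (if d.contains (pvBase b) then
            d.modify (pvBase b) PySem.Set.empty fun s => PySem.Set.add s (pvDid b)
          else d)
        else d) from rfl]
  rw [pv_master pvPriv pvBase (fun r s => PySem.Set.add s (pvDid r)) rows (pvD2 rows) hd2keys,
      hd2, List.map_map]
  -- align both sides as maps over the literal nine keys
  have hitems : pvD0.items = pvKeys9.map (fun k => (k, ([] : PySem.Set String))) := by decide
  have hsplit : ∀ (l : List Int),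
      l.map (fun i =>
          let k := "U" ++ PySem.Int.toStr i
          (k, PySem.Set.ofList (((rows.filter pvPub).map pvDid) ++
            ((rows.filter (fun r => pvPriv r && (pvBase r == k))).map pvDid))))
        = (l.map (fun i => "U" ++ PySem.Int.toStr i)).map (fun k =>
            (k, PySem.Set.ofList (((rows.filter pvPub).map pvDid) ++
              ((rows.filter (fun r => pvPriv r && (pvBase r == k))).map pvDid)))) := by
    intro l
    rw [List.map_map]
    rfl
  have hrange : (PySem.List.pyRange 1 10 1).map (fun i => "U" ++ PySem.Int.toStr i) = pvKeys9 := by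
    decide
  rw [hsplit, hrange, hitems, List.map_map]
  apply List.map_congr_left
  intro k _
  exact congrArg (Prod.mk k) (pv_key rows k)
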